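-- pv_equiv track=rewrite | github.com/asharma327/name_ending_analysis | gender_name_endings.py | get_count_of_ending_letters
-- ===== SOURCE A (Python) =====
-- def get_count_of_ending_letters(names):
--     # Return Dictionary with count of all ending letter
--     count_of_ending_letters = {}
--
--     for name in names:
--         exisiting_letters = count_of_ending_letters.keys()
--         ending_letter = name[-1]
--         if ending_letter not in exisiting_letters:
--             count_of_ending_letters[ending_letter] = 1
--         else:
--             count_of_ending_letters[ending_letter] += 1
--
--     return count_of_ending_letters
-- ===== SOURCE B (Python) =====
-- def get_count_of_ending_letters(names):
--     # Recursive group-by-filter: take the first ending letter, count it in the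
--     # whole list, then recurse on the list with that letter filtered out.
--     letters = [name[-1] for name in names]
--
--     def group(ls):
--         if not ls:
--             return {}
--         first = ls[0]
--         result = {first: ls.count(first)}
--         # keys of group(...) are drawn from ls[1:] minus `first`, so no overlap
--         result.update(group([x for x in ls[1:] if x != first]))
--         return result
--
--     return group(letters)
-- ===== Notes on version B (the rewrite author's own statement) =====
-- stated objective: alternative
-- what changed: B replaces A's single-pass incremental dict counting with a recursive group-by-filter: materialize the ending letters, then repeatedly take the first letter, assign it its total list.count, and recurse on the list with that letter filtered out.
import Mathlib
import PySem

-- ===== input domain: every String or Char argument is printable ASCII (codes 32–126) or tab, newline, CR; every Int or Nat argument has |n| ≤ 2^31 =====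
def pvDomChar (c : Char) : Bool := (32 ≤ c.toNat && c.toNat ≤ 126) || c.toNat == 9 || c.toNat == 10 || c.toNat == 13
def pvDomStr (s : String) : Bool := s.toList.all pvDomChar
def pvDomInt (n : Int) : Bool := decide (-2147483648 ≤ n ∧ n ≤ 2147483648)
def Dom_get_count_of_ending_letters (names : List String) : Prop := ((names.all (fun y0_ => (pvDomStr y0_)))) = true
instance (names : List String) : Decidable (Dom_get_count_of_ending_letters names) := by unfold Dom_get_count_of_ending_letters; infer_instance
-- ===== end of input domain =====

-- B replaces A's incremental counting loop with a recursive group-by-filter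
-- (first ending letter gets its total list.count, recurse on the rest filtered);
-- alternative decomposition, no speed claim.


-- ===== PORT A =====
-- Literal port of A: a loop over names keeping a running dict; name[-1] via
-- PySem.Str.pyGet? (none = IndexError on an empty name, excluded by Pre_;
-- the 'none => d' branch is unreachable under Pre_).
def get_count_of_ending_letters (names : List String) : List (String × Int) :=
  (names.foldl (fun d name =>
      match PySem.Str.pyGet? name (-1) with
      | none => d
      | some c =>
        let ending_letter := String.ofList [c]
        if d.contains ending_letter = false then
          d.insert ending_letter 1
        else
          d.insert ending_letter (d.getD ending_letter 0 + 1))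
    PySem.Dict.empty).items

-- ===== PORT B =====
-- 'group(ls)': {ls[0]: ls.count(ls[0])} then update with the recursive call on
-- ls[1:] with ls[0] filtered out; since group's keys come from its argument,
-- the updated keys are disjoint from ls[0], so dict-literal + update is
-- exactly this cons.
def pvGroup (ls : List String) : List (String × Int) :=
  match ls with
  | [] => []
  | first :: rest =>
    (first, (PySem.List.count (first :: rest) first : Int)) ::
      pvGroup (rest.filter (fun x => !(x == first)))
termination_by ls.length
decreasing_by
  simp only [List.length_unattach, List.length_cons]
  exact Nat.lt_succ_of_le (le_trans (List.length_filter_le _ _) (by simp))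

-- Port of B: 'letters = [name[-1] for name in names]' (the "" default is only
-- taken where Python raises, i.e. outside Pre_), then the recursive group pass.
def get_count_of_ending_letters_alt (names : List String) : List (String × Int) :=
  let letters := names.map (fun name =>
    match PySem.Str.pyGet? name (-1) with
    | none => ""
    | some c => String.ofList [c])
  pvGroup letters

-- ===== PRECONDITION & SPEC =====
-- A raises IndexError on name[-1] for an empty name string; Pre_ excludes only those inputs.
def Pre_get_count_of_ending_letters (names : List String) : Prop := ∀ s ∈ names, s ≠ ""
instance (names : List String) : Decidable (Pre_get_count_of_ending_letters names) := by unfold Pre_get_count_of_ending_letters; infer_instance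
def pvWitness_get_count_of_ending_letters : List String := ["Anna", "Bob", "Maria"]
def Spec_get_count_of_ending_letters (names : List String) (out : List (String × Int)) : Prop := out = get_count_of_ending_letters_alt names
instance (names : List String) (out : List (String × Int)) : Decidable (Spec_get_count_of_ending_letters names out) := by unfold Spec_get_count_of_ending_letters; infer_instance

-- ===== CLAIM (what is proved, stated in full; the proofs are below) =====
def Claim_equal_get_count_of_ending_letters : Prop := ∀ (names : List String), Dom_get_count_of_ending_letters names → Pre_get_count_of_ending_letters names → Spec_get_count_of_ending_letters names (get_count_of_ending_letters names)

-- ===== LEMMAS AND PROOFS =====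

theorem pvGroup_nil : pvGroup [] = [] := by unfold pvGroup; rfl

theorem pvGroup_cons (a : String) (t : List String) : pvGroup (a :: t) =
    (a, (PySem.List.count (a :: t) a : Int)) :: pvGroup (t.filter (fun x => !(x == a))) := by
  conv_lhs => unfold pvGroup

-- the ending-letter of a nonempty string, as a 1-char string
def pvLast (name : String) : String :=
  match PySem.Str.pyGet? name (-1) with
  | none => ""
  | some c => String.ofList [c]

-- dedup-from-the-left commutes with filtering one element out
theorem pv_ofList_filter (t : List String) (c : String) :
    PySem.Set.ofList (t.filter (fun y => !(y == c))) =
      PySem.Set.discard (PySem.Set.ofList t) c := by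
  induction t with
  | nil => rfl
  | cons a t' ih =>
    by_cases hac : a = c
    · subst hac
      simp only [List.filter_cons, beq_self_eq_true, Bool.not_true, Bool.false_eq_true,
        if_false, ih, PySem.Set.ofList_cons, PySem.Set.discard, List.filter_cons,
        List.filter_filter]
      simp
    · have hbeq : (a == c) = false := by simp [hac]
      simp only [List.filter_cons, hbeq, Bool.not_false, if_true, PySem.Set.ofList_cons, ih,
        PySem.Set.discard, List.filter_cons, List.filter_filter]
      simp [Bool.and_comm]

-- B's recursion produces the first-occurrence letters, each with its total count
theorem pv_pvGroup_eq_aux (n : Nat) : ∀ ls : List String, ls.length ≤ n →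
    pvGroup ls = (PySem.Set.ofList ls).map (fun k => (k, (List.count k ls : Int))) := by
  induction n with
  | zero =>
    intro ls h
    have : ls = [] := by cases ls <;> simp_all
    subst this
    simp [pvGroup_nil]
  | succ n ihn =>
    intro ls h
    match ls with
    | [] => simp [pvGroup_nil]
    | first :: rest =>
    have ih := ihn (rest.filter (fun x => !(x == first)))
      (le_trans (List.length_filter_le _ _) (by simpa using Nat.le_of_succ_le_succ h))
    rw [pvGroup_cons, ih, PySem.Set.ofList_cons, ← pv_ofList_filter rest first]
    simp only [List.map_cons, PySem.List.count]
    congr 1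
    apply List.map_congr_left
    intro k hk
    have hkmem : k ∈ rest.filter (fun y => !(y == first)) := by simpa [PySem.Set.mem_ofList] using hk
    have hkne : k ≠ first := by
      have := List.of_mem_filter hkmem
      simpa using this
    have h1 : List.count k (rest.filter (fun y => !(y == first))) = List.count k rest := by
      rw [List.count_filter]
      simp [hkne]
    have h2 : List.count k (first :: rest) = List.count k rest := by
      simp [Ne.symm hkne]
    rw [h1, h2]

theorem pv_pvGroup_eq (ls : List String) :
    pvGroup ls = (PySem.Set.ofList ls).map (fun k => (k, (List.count k ls : Int))) :=
  pv_pvGroup_eq_aux ls.length ls le_rfl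

-- A's loop body is the counter step (on a nonempty name, via pvLast)
theorem pv_A_eq_counter (names : List String)
    (h : ∀ s ∈ names, s ≠ "") :
    get_count_of_ending_letters names =
      (PySem.Dict.counter (names.map pvLast)).items := by
  unfold get_count_of_ending_letters
  rw [← PySem.Dict.foldl_insert_getD_add_one_eq_counter, List.foldl_map]
  congr 1
  apply PySem.List.foldl_congr_mem
  intro d name hmem
  have hne : name.toList ≠ [] := by
    intro hnil
    exact h name hmem (by cases name; simp_all)
  have : PySem.Str.pyGet? name (-1) = name.toList.getLast? := by
    simp [PySem.Str.pyGet?, PySem.Chars.pyGet?, PySem.List.pyGet?_neg_one]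
  have hsome : (PySem.Str.pyGet? name (-1)).isSome = true := by
    rw [this]; exact List.getLast?_isSome.mpr hne
  obtain ⟨c, hc⟩ := Option.isSome_iff_exists.mp hsome
  rw [hc]
  simp only [pvLast, hc]
  by_cases hcon : d.contains (String.ofList [c])
  · simp [hcon]
  · have hcf : d.contains (String.ofList [c]) = false := by simpa using hcon
    simp [hcf, PySem.Dict.getD_of_not_contains]

-- ===== VERDICT (by name: the statement is the Claim_ definition above) =====
theorem get_count_of_ending_letters_spec : Claim_equal_get_count_of_ending_letters := by
  intro names _ hpre
  unfold Spec_get_count_of_ending_letters get_count_of_ending_letters_alt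
  rw [pv_A_eq_counter names hpre, PySem.Dict.items_counter, pv_pvGroup_eq]
  rfl
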